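-- pv_equiv track=rewrite | github.com/eacevedof/prj_bash | py/routines/doctrine.py | has_unused_field
-- ===== SOURCE A (Python) =====
-- def has_unused_field(strline):
--     arunused = [
--         "processflag","insert_platform","insert_user","insert_date","update_platform","update_user","update_date","delete_platform","delete_user","delete_date","cru_csvnote"
--         ,"is_erpsent","is_enabled","i","code_erp","description","code_cache",
--     ]
--     for field in arunused:
--         if strline.find(f"Column(name=\"{field}\", type=")!= -1:
--             return True
--     return False
-- ===== SOURCE B (Python) =====
-- UNUSED = {
--     "processflag", "insert_platform", "insert_user", "insert_date",
--     "update_platform", "update_user", "update_date", "delete_platform",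
--     "delete_user", "delete_date", "cru_csvnote", "is_erpsent", "is_enabled",
--     "i", "code_erp", "description", "code_cache",
-- }
--
-- PREFIX = 'Column(name="'
--
--
-- def has_unused_field(strline):
--     # Single pass: at each position parse one Column(name="<name>", type= declaration
--     # and test the extracted name against the set, instead of one full-string scan per field.
--     for i in range(len(strline)):
--         if strline.startswith(PREFIX, i):
--             name, quote, tail = strline[i + len(PREFIX):].partition('"')
--             if quote and name in UNUSED and tail.startswith(', type='):
--                 return True
--     return False
-- ===== Notes on version B (the rewrite author's own statement) =====
-- stated objective: alternative
-- what changed: Instead of scanning the whole line once for each of the 17 unused field names with str.find, B makes a single left-to-right pass that parses each column declaration it meets, extracts the declared name and tests it against a set of the unused names.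
import Mathlib
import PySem

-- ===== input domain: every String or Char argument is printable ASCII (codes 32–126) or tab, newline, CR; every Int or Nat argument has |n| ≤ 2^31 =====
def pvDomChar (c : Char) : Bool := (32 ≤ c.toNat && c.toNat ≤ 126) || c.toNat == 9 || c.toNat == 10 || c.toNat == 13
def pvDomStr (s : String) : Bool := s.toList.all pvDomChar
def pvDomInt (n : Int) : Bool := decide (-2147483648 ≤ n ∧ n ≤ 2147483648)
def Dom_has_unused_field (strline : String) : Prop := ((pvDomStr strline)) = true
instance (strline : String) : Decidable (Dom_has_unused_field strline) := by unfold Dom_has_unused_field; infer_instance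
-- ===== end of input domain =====

-- B replaces A's 17 whole-line find-scans (one per unused field) by a single left-to-right pass
-- that parses each column declaration and tests the extracted name against a set of the unused
-- names (objective: alternative).

-- ===== PORT A =====
def pvArunused : List String :=
  ["processflag", "insert_platform", "insert_user", "insert_date", "update_platform",
   "update_user", "update_date", "delete_platform", "delete_user", "delete_date",
   "cru_csvnote", "is_erpsent", "is_enabled", "i", "code_erp", "description", "code_cache"]

def pvLoopA (strline : String) : List String → Bool
  | [] => false
  | field :: rest =>
      if PySem.Str.find strline ("Column(name=\"" ++ field ++ "\", type=") ≠ -1 then true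
      else pvLoopA strline rest

def has_unused_field (strline : String) : Bool :=
  pvLoopA strline pvArunused

-- ===== PORT B =====
-- the set literal UNUSED of Source B: 17 distinct names, held as the list of its elements
def pvUnused : List (List Char) :=
  ["processflag".toList, "insert_platform".toList, "insert_user".toList, "insert_date".toList,
   "update_platform".toList, "update_user".toList, "update_date".toList, "delete_platform".toList,
   "delete_user".toList, "delete_date".toList, "cru_csvnote".toList, "is_erpsent".toList,
   "is_enabled".toList, "i".toList, "code_erp".toList, "description".toList, "code_cache".toList]

def pvPrefixB : List Char := "Column(name=\"".toList

-- the body of Source B's loop at position i, on the suffix t = strline[i:]: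
-- strline.startswith(PREFIX, i) is pvPrefixB.isPrefixOf t, and partition('"') is ported
-- exactly: name = the part before the first quote, q nonempty iff a quote was found
-- (its head is that quote), tail = q.drop 1
def pvHit (t : List Char) : Bool :=
  if pvPrefixB.isPrefixOf t then
    let r := t.drop pvPrefixB.length
    let name := r.takeWhile (fun c => c ≠ '"')
    let q := r.dropWhile (fun c => c ≠ '"')
    !q.isEmpty && pvUnused.contains name && ", type=".toList.isPrefixOf (q.drop 1)
  else false

-- for i in range(len(strline)): early return True on a hit
def pvScanB (cs : List Char) (i : Nat) : Bool :=
  if i < cs.length then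
    pvHit (cs.drop i) || pvScanB cs (i + 1)
  else false
termination_by cs.length - i

def has_unused_field_alt (strline : String) : Bool :=
  pvScanB strline.toList 0

-- ===== PRECONDITION & SPEC =====
def Spec_has_unused_field (strline : String) (out : Bool) : Prop := out = has_unused_field_alt strline
instance (strline : String) (out : Bool) : Decidable (Spec_has_unused_field strline out) := by unfold Spec_has_unused_field; infer_instance

-- ===== CLAIM (what is proved, stated in full; the proofs are below) =====
def Claim_equal_has_unused_field : Prop := ∀ (strline : String), Dom_has_unused_field strline → Spec_has_unused_field strline (has_unused_field strline)

-- ===== LEMMAS AND PROOFS =====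

-- the full pattern A searches for, on the list side
def pvPat (f : List Char) : List Char := pvPrefixB ++ f ++ "\", type=".toList

theorem pvUnused_eq : pvUnused = pvArunused.map String.toList := rfl

theorem pvPat_ne_nil (f : List Char) : pvPat f ≠ [] := by
  simp [pvPat, pvPrefixB]

theorem pvUnused_no_quote : ∀ f ∈ pvUnused, ∀ c ∈ f, (decide (c ≠ '"')) = true := by
  have h : pvUnused.all (fun f => f.all (fun c => decide (c ≠ '"'))) = true := by decide
  simpa [List.all_eq_true] using h

theorem pvLoopA_iff (s : String) (fs : List String) :
    pvLoopA s fs = true ↔ ∃ f ∈ fs, pvPat f.toList <:+: s.toList := by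
  induction fs with
  | nil => simp [pvLoopA]
  | cons f rest ih =>
    have hiff : (PySem.Str.find s ("Column(name=\"" ++ f ++ "\", type=") ≠ -1)
        ↔ pvPat f.toList <:+: s.toList := by
      rw [PySem.Str.find_ne_neg_one_iff]
      simp [pvPat, pvPrefixB]
    rw [pvLoopA]
    split_ifs with h
    · exact iff_of_true rfl ⟨f, List.mem_cons_self, hiff.mp h⟩
    · rw [ih]
      constructor
      · rintro ⟨g, hg, hp⟩
        exact ⟨g, List.mem_cons_of_mem f hg, hp⟩
      · rintro ⟨g, hg, hp⟩
        rcases List.mem_cons.mp hg with rfl | hg'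
        · exact absurd (hiff.mpr hp) h
        · exact ⟨g, hg', hp⟩

theorem pvHit_iff (t : List Char) :
    pvHit t = true ↔ ∃ f ∈ pvUnused, pvPat f <+: t := by
  have hs8 : ("\", type=".toList : List Char) = '"' :: ", type=".toList := by decide
  constructor
  · intro h
    rw [pvHit] at h
    split_ifs at h with hp
    obtain ⟨r, rfl⟩ := List.isPrefixOf_iff_prefix.mp hp
    simp only [List.drop_left, Bool.and_eq_true, Bool.not_eq_eq_eq_not,
      List.contains_iff_mem, List.isPrefixOf_iff_prefix] at h
    obtain ⟨⟨hq, hname⟩, htail⟩ := h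
    have hqne : r.dropWhile (fun c => decide (c ≠ '"')) ≠ [] := by simpa using hq
    have hquote : (r.dropWhile (fun c => decide (c ≠ '"'))).head hqne = '"' := by
      have hh := List.head_dropWhile_not (fun c => decide (c ≠ '"')) hqne
      simpa using hh
    obtain ⟨z, hz⟩ := htail
    refine ⟨r.takeWhile (fun c => decide (c ≠ '"')), hname, z, ?_⟩
    have hqd : r.dropWhile (fun c => decide (c ≠ '"'))
        = '"' :: (r.dropWhile (fun c => decide (c ≠ '"'))).drop 1 := by
      conv_lhs => rw [← List.cons_head_tail hqne]
      rw [hquote, List.drop_one]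
    calc pvPat (r.takeWhile (fun c => decide (c ≠ '"'))) ++ z
        = pvPrefixB ++ (r.takeWhile (fun c => decide (c ≠ '"'))
            ++ ('"' :: (", type=".toList ++ z))) := by
          simp [pvPat, hs8]
      _ = pvPrefixB ++ r := by
          rw [hz]
          conv_rhs => rw [← List.takeWhile_append_dropWhile
            (p := fun c => decide (c ≠ '"')) (l := r)]
          conv_rhs => rw [hqd]
  · rintro ⟨f, hf, z, hz⟩
    have hfq : ∀ c ∈ f, (decide (c ≠ '"')) = true := pvUnused_no_quote f hf
    rw [pvPat, hs8] at hz
    rw [pvHit]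
    have hpre : pvPrefixB.isPrefixOf t = true := by
      rw [List.isPrefixOf_iff_prefix]
      exact ⟨f ++ ('"' :: ", type=".toList) ++ z, by rw [← hz]; simp⟩
    rw [if_pos hpre]
    have hdrop : t.drop pvPrefixB.length = f ++ ('"' :: (", type=".toList ++ z)) := by
      rw [← hz]; simp
    simp only [hdrop]
    rw [List.takeWhile_append_of_pos hfq, List.dropWhile_append_of_pos hfq]
    simp [hf]

theorem pvScanB_iff (cs : List Char) (i : Nat) :
    pvScanB cs i = true ↔ ∃ j, i ≤ j ∧ j < cs.length ∧ pvHit (cs.drop j) = true := by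
  have key : ∀ n i, cs.length - i ≤ n →
      (pvScanB cs i = true ↔ ∃ j, i ≤ j ∧ j < cs.length ∧ pvHit (cs.drop j) = true) := by
    intro n
    induction n with
    | zero =>
      intro i hn
      have hi : ¬ i < cs.length := by omega
      rw [pvScanB, if_neg hi]
      constructor
      · intro h; cases h
      · rintro ⟨j, h1, h2, _⟩; omega
    | succ n ih =>
      intro i hn
      rw [pvScanB]
      by_cases hi : i < cs.length
      · rw [if_pos hi, Bool.or_eq_true, ih (i + 1) (by omega)]
        constructor
        · rintro (hhit | ⟨j, hj1, hj2, hj3⟩)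
          · exact ⟨i, Nat.le_refl _, hi, hhit⟩
          · exact ⟨j, by omega, hj2, hj3⟩
        · rintro ⟨j, hj1, hj2, hj3⟩
          rcases Nat.eq_or_lt_of_le hj1 with rfl | hlt
          · exact Or.inl hj3
          · exact Or.inr ⟨j, by omega, hj2, hj3⟩
      · rw [if_neg hi]
        constructor
        · intro h; cases h
        · rintro ⟨j, h1, h2, _⟩; omega
  exact key (cs.length - i) i (Nat.le_refl _)

-- ===== VERDICT (by name: the statement is the Claim_ definition above) =====
theorem has_unused_field_spec : Claim_equal_has_unused_field := by
  intro s _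
  unfold Spec_has_unused_field has_unused_field has_unused_field_alt
  rw [Bool.eq_iff_iff, pvLoopA_iff, pvScanB_iff]
  constructor
  · rintro ⟨f, hf, hinf⟩
    have h1 : ∃ j, pvPat f.toList <+: s.toList.drop j := by
      rw [PySem.Chars.exists_prefix_drop_iff_isIn, PySem.Chars.isIn_iff_infix]
      exact hinf
    obtain ⟨j, hj⟩ := h1
    have hjlt : j < s.toList.length := by
      by_contra hge
      have hnil : s.toList.drop j = [] := List.drop_eq_nil_of_le (by omega)
      rw [hnil, List.prefix_nil] at hj
      exact pvPat_ne_nil _ hj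
    refine ⟨j, Nat.zero_le _, hjlt, ?_⟩
    rw [pvHit_iff]
    exact ⟨f.toList, by rw [pvUnused_eq]; exact List.mem_map_of_mem hf, hj⟩
  · rintro ⟨j, _, hjlt, hhit⟩
    rw [pvHit_iff] at hhit
    obtain ⟨g, hg, hpre⟩ := hhit
    rw [pvUnused_eq] at hg
    obtain ⟨f, hf, rfl⟩ := List.mem_map.mp hg
    refine ⟨f, hf, ?_⟩
    rw [← PySem.Chars.isIn_iff_infix, ← PySem.Chars.exists_prefix_drop_iff_isIn]
    exact ⟨j, hpre⟩
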